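-- pv_equiv track=rewrite | github.com/yuchenxi2000/atom-dft2 | configuration.py | get_configuration
-- ===== SOURCE A (Python) =====
-- def get_configuration(Z: int) -> dict[(int, int), int]:
--     # for neutral atoms only
--     # Aufbau principle from https://en.wikipedia.org/wiki/Aufbau_principle
--     # also refer to https://chem.libretexts.org/Bookshelves/Inorganic_Chemistry/Inorganic_Chemistry_(LibreTexts)/02%3A_Atomic_Structure/2.02%3A_The_Schrodinger_equation_particle_in_a_box_and_atomic_wavefunctions/2.2.03%3A_Aufbau_Principle
--     config_map = {}
--     nl = 1
--     elec_remain = Z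
--     # 1s, 2s, 2p, 3s, 3p, 4s, 3d, 4p, 5s, 4d, 5p, 6s, 4f, 5d, 6p, 7s, 5f, 6d, 7p, 8s, 5g
--     while elec_remain > 0:
--         for nr in range(nl):
--             l = nl - nr - 1
--             if l <= nr:
--                 max_occ = 2 * (2 * l + 1)
--                 if elec_remain > max_occ:
--                     occ = max_occ
--                 else:
--                     occ = elec_remain
--                 if occ == 0:
--                     break
--                 config_map[(nr+1, l)] = occ
--                 elec_remain -= occ
--         nl += 1
--     # exceptions in d-block
--     if Z in [24, 29]:  # Cr, Cu
--         config_map[(3, 2)] += 1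
--         config_map[(4, 0)] -= 1
--     elif Z in [41, 42, 44, 45, 47]:  # Nb, Mo, Ru, Rh, Ag
--         config_map[(4, 2)] += 1
--         config_map[(5, 0)] -= 1
--     elif Z in [46]:  # Pd
--         config_map[(4, 2)] += 2
--         del config_map[(5, 0)]
--     elif Z in [78, 79]:  # Pt, Au
--         config_map[(5, 2)] += 1
--         config_map[(6, 0)] -= 1
--     elif Z in [103]:  # Lr
--         del config_map[(6, 2)]
--         config_map[(7, 1)] = 1
--     # exceptions in f-block
--     elif Z in [57]:  # La
--         del config_map[(4, 3)]
--         config_map[(5, 2)] = 1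
--     elif Z in [58, 64]:  # Ce, Gd
--         config_map[(4, 3)] -= 1
--         config_map[(5, 2)] = 1
--     elif Z in [89, 90]:  # Ac, Th
--         config_map[(6, 2)] = config_map[(5, 3)]
--         del config_map[(5, 3)]
--     elif Z in [91, 92, 93, 96]:  # Pa, U, Np, Cm
--         config_map[(5, 3)] -= 1
--         config_map[(6, 2)] = 1
--     return config_map
-- ===== SOURCE B (Python) =====
-- # B: stateless closed-form occupancy. The number of electrons that sit in earlier
-- # subshells than (n, l) in Madelung order is a closed-form polynomial before(n, l)
-- # (sum of full-diagonal capacities 2*ceil(t/2)**2 plus the earlier part of the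
-- # diagonal n+l); each subshell's occupancy is then min(2*(2*l+1), Z - before(n, l)),
-- # computed independently with no running elec_remain accumulator and no break.
-- # The element-exception block is byte-for-byte identical to A's.
-- def get_configuration(Z: int) -> dict[(int, int), int]:
--     def before(n, l):
--         s = n + l
--         # capacity of the full diagonals t = 1 .. s-1 (diagonal t holds 2*ceil(t/2)**2)
--         k = (s - 1) // 2
--         full = 2 * k * (k + 1) * (2 * k + 1) // 3
--         if (s - 1) % 2 == 1:
--             full += 2 * (k + 1) ** 2
--         # plus the subshells of diagonal s with larger l (filled earlier): l+1 .. lmax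
--         lmax = s - (s // 2 + 1)
--         return full + 2 * ((lmax + 1) ** 2 - (l + 1) ** 2)
--     config_map = {}
--     s = 1
--     while before(s // 2 + 1, s - (s // 2 + 1)) < Z:  # diagonal s starts before electron Z
--         for n in range(s // 2 + 1, s + 1):
--             l = s - n
--             occ = min(2 * (2 * l + 1), Z - before(n, l))
--             if occ > 0:
--                 config_map[(n, l)] = occ
--         s += 1
--     # exceptions in d-block
--     if Z in [24, 29]:  # Cr, Cu
--         config_map[(3, 2)] += 1
--         config_map[(4, 0)] -= 1
--     elif Z in [41, 42, 44, 45, 47]:  # Nb, Mo, Ru, Rh, Ag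
--         config_map[(4, 2)] += 1
--         config_map[(5, 0)] -= 1
--     elif Z in [46]:  # Pd
--         config_map[(4, 2)] += 2
--         del config_map[(5, 0)]
--     elif Z in [78, 79]:  # Pt, Au
--         config_map[(5, 2)] += 1
--         config_map[(6, 0)] -= 1
--     elif Z in [103]:  # Lr
--         del config_map[(6, 2)]
--         config_map[(7, 1)] = 1
--     # exceptions in f-block
--     elif Z in [57]:  # La
--         del config_map[(4, 3)]
--         config_map[(5, 2)] = 1
--     elif Z in [58, 64]:  # Ce, Gd
--         config_map[(4, 3)] -= 1
--         config_map[(5, 2)] = 1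
--     elif Z in [89, 90]:  # Ac, Th
--         config_map[(6, 2)] = config_map[(5, 3)]
--         del config_map[(5, 3)]
--     elif Z in [91, 92, 93, 96]:  # Pa, U, Np, Cm
--         config_map[(5, 3)] -= 1
--         config_map[(6, 2)] = 1
--     return config_map
-- ===== Notes on version B (the rewrite author's own statement) =====
-- stated objective: alternative
-- what changed: A fills subshells sequentially with a mutable elec_remain counter decremented inside a nested diagonal scan with a break; B eliminates the running counter entirely: a closed-form polynomial before(n,l) gives the electrons placed ahead of each subshell in Madelung order, so every occupancy is computed independently as min(2*(2*l+1), Z - before(n,l)) and kept when positive; the element-exception block is byte-for-byte identical.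
import Mathlib
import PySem

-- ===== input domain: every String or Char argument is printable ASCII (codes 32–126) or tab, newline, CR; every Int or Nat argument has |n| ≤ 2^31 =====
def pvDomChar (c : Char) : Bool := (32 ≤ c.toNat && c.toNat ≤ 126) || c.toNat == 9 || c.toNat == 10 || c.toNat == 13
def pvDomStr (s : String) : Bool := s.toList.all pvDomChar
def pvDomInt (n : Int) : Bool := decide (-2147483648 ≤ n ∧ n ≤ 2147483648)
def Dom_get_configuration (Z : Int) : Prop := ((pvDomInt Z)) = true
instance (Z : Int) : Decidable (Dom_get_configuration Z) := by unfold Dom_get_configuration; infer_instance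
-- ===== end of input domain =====

-- B replaces A's stateful elec_remain decrement by a stateless closed-form prefix
-- polynomial before(n, l); each occupancy is computed independently. Objective:
-- alternative algorithm, same results.

-- The element-exception block is byte-for-byte identical in Source A and Source B, so both
-- ports share this helper. `modify k 0 f` ports `c[k] += …` and `getD (5,3) 0` ports
-- `c[(5,3)]`: exact here because at every listed Z the key is present (KeyError unreachable).
def pvExceptions (Z : Int) (c : PySem.Dict (Int × Int) Int) : PySem.Dict (Int × Int) Int :=
  if Z = 24 ∨ Z = 29 then (c.modify (3, 2) 0 (· + 1)).modify (4, 0) 0 (· - 1)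
  else if Z = 41 ∨ Z = 42 ∨ Z = 44 ∨ Z = 45 ∨ Z = 47 then
    (c.modify (4, 2) 0 (· + 1)).modify (5, 0) 0 (· - 1)
  else if Z = 46 then (c.modify (4, 2) 0 (· + 2)).erase (5, 0)
  else if Z = 78 ∨ Z = 79 then (c.modify (5, 2) 0 (· + 1)).modify (6, 0) 0 (· - 1)
  else if Z = 103 then ((c.erase (6, 2)).insert (7, 1) 1)
  else if Z = 57 then ((c.erase (4, 3)).insert (5, 2) 1)
  else if Z = 58 ∨ Z = 64 then (c.modify (4, 3) 0 (· - 1)).insert (5, 2) 1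
  else if Z = 89 ∨ Z = 90 then (c.insert (6, 2) (c.getD (5, 3) 0)).erase (5, 3)
  else if Z = 91 ∨ Z = 92 ∨ Z = 93 ∨ Z = 96 then (c.modify (5, 3) 0 (· - 1)).insert (6, 2) 1
  else c

-- ===== PORT A =====
-- the `for nr in range(nl)` body; `if occ == 0: break` is the early return
def pvInnerA (nl : Int) (c : PySem.Dict (Int × Int) Int) (rem : Int) :
    List Int → PySem.Dict (Int × Int) Int × Int
  | [] => (c, rem)
  | nr :: rest =>
    let l := nl - nr - 1
    if l ≤ nr then
      let maxOcc := 2 * (2 * l + 1)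
      let occ := if rem > maxOcc then maxOcc else rem
      if occ = 0 then (c, rem)
      else pvInnerA nl (c.insert (nr + 1, l) occ) (rem - occ) rest
    else pvInnerA nl c rem rest

-- `while elec_remain > 0`. The fuel is a totality guard only: every iteration with
-- nl ≥ 1 lowers elec_remain by at least 1, so Z.toNat steps suffice.
def pvWhileA (c : PySem.Dict (Int × Int) Int) (nl rem : Int) :
    Nat → PySem.Dict (Int × Int) Int × Int
  | 0 => (c, rem)
  | fuel + 1 =>
    if rem > 0 then
      let p := pvInnerA nl c rem (PySem.List.pyRange 0 nl 1)
      pvWhileA p.1 (nl + 1) p.2 fuel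
    else (c, rem)

def get_configuration (Z : Int) : List (Int × Int × Int) :=
  let p := pvWhileA PySem.Dict.empty 1 Z Z.toNat
  -- dict[(int,int),int] flattened to output triples (n, l, occ)
  (pvExceptions Z p.1).items.map (fun q => (q.1.1, q.1.2, q.2))

-- ===== PORT B =====
-- the closed-form helper `before(n, l)`: electrons in full diagonals 1..s-1 …
def pvFull (s : Int) : Int :=
  let k := PySem.Int.floordiv (s - 1) 2
  let full := PySem.Int.floordiv (2 * k * (k + 1) * (2 * k + 1)) 3
  if PySem.Int.mod (s - 1) 2 = 1 then full + 2 * (k + 1) ^ 2 else full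

-- … plus the earlier subshells of diagonal s itself (l' from l+1 to lmax)
def pvBefore (n l : Int) : Int :=
  let s := n + l
  let lmax := s - (PySem.Int.floordiv s 2 + 1)
  pvFull s + 2 * ((lmax + 1) ^ 2 - (l + 1) ^ 2)

-- `for n in range(s // 2 + 1, s + 1)` with the independent occupancy formula
def pvInnerB (Z s : Int) (c : PySem.Dict (Int × Int) Int) :
    List Int → PySem.Dict (Int × Int) Int
  | [] => c
  | n :: rest =>
    let l := s - n
    let occ := min (2 * (2 * l + 1)) (Z - pvBefore n l)
    if occ > 0 then pvInnerB Z s (c.insert (n, l) occ) rest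
    else pvInnerB Z s c rest

-- `while before(s // 2 + 1, s - (s // 2 + 1)) < Z`. The fuel is a totality guard
-- only: each diagonal raises `before` by at least 2, so Z.toNat steps suffice.
def pvWhileB (Z : Int) (c : PySem.Dict (Int × Int) Int) (s : Int) :
    Nat → PySem.Dict (Int × Int) Int
  | 0 => c
  | fuel + 1 =>
    if pvBefore (PySem.Int.floordiv s 2 + 1) (s - (PySem.Int.floordiv s 2 + 1)) < Z then
      pvWhileB Z
        (pvInnerB Z s c (PySem.List.pyRange (PySem.Int.floordiv s 2 + 1) (s + 1) 1))
        (s + 1) fuel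
    else c

def get_configuration_alt (Z : Int) : List (Int × Int × Int) :=
  let c := pvWhileB Z PySem.Dict.empty 1 Z.toNat
  (pvExceptions Z c).items.map (fun r => (r.1.1, r.1.2, r.2))

-- ===== PRECONDITION & SPEC =====
def Spec_get_configuration (Z : Int) (out : List (Int × Int × Int)) : Prop := out = get_configuration_alt Z
instance (Z : Int) (out : List (Int × Int × Int)) : Decidable (Spec_get_configuration Z out) := by unfold Spec_get_configuration; infer_instance

-- ===== CLAIM (what is proved, stated in full; the proofs are below) =====
def Claim_equal_get_configuration : Prop := ∀ (Z : Int), Dom_get_configuration Z → Spec_get_configuration Z (get_configuration Z)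

-- ===== LEMMAS AND PROOFS =====

-- one A-side fill step over a (n, l) subshell, with the remaining-electron counter
def pvStep (st : PySem.Dict (Int × Int) Int × Int) (p : Int × Int) :
    PySem.Dict (Int × Int) Int × Int :=
  if st.2 = 0 then st
  else (st.1.insert p (min st.2 (2 * (2 * p.2 + 1))), st.2 - min st.2 (2 * (2 * p.2 + 1)))

-- one B-side step: the prefix capacity replaces the remaining counter
def pvGStep (Z : Int) (st : PySem.Dict (Int × Int) Int × Int) (p : Int × Int) :
    PySem.Dict (Int × Int) Int × Int :=
  ((if st.2 < Z then st.1.insert p (min (Z - st.2) (2 * (2 * p.2 + 1))) else st.1),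
    st.2 + 2 * (2 * p.2 + 1))

def pvCapList (xs : List (Int × Int)) : Int := (xs.map (fun p => 2 * (2 * p.2 + 1))).sum

def pvBlock (s : Int) : List (Int × Int) :=
  (PySem.List.pyRange (PySem.Int.floordiv s 2 + 1) (s + 1) 1).map (fun n => (n, s - n))

theorem fold_zero (xs : List (Int × Int)) (c : PySem.Dict (Int × Int) Int) :
    List.foldl pvStep (c, 0) xs = (c, 0) := by
  induction xs with
  | nil => rfl
  | cons p rest ih => simpa [pvStep] using ih

theorem gfold_noins (Z : Int) (xs : List (Int × Int)) :
    ∀ (c : PySem.Dict (Int × Int) Int) (P : Int), Z ≤ P → (∀ p ∈ xs, 0 ≤ p.2) →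
    (List.foldl (pvGStep Z) (c, P) xs).1 = c := by
  induction xs with
  | nil => intro c P _ _; rfl
  | cons p rest ih =>
    intro c P hZP h
    have hp := h p (by simp)
    rw [List.foldl_cons, show pvGStep Z (c, P) p = (c, P + 2 * (2 * p.2 + 1)) from by
      simp [pvGStep]; omega]
    exact ih _ _ (by omega) (fun q hq => h q (by simp [hq]))

theorem gfold_snd (Z : Int) (xs : List (Int × Int)) :
    ∀ (c : PySem.Dict (Int × Int) Int) (P : Int),
    (List.foldl (pvGStep Z) (c, P) xs).2 = P + pvCapList xs := by
  induction xs with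
  | nil => intro c P; simp [pvCapList]
  | cons p rest ih =>
    intro c P
    rw [List.foldl_cons]
    show (List.foldl (pvGStep Z) ((pvGStep Z (c, P) p).1, P + 2 * (2 * p.2 + 1)) rest).2 = _
    rw [ih]
    simp [pvCapList]; ring

-- bridge: A's counter fold and B's prefix fold build the same dict
theorem fold_AtoG (Z : Int) (xs : List (Int × Int)) :
    ∀ (c : PySem.Dict (Int × Int) Int) (P : Int), (∀ p ∈ xs, 0 ≤ p.2) →
    (List.foldl pvStep (c, max (Z - P) 0) xs).1 = (List.foldl (pvGStep Z) (c, P) xs).1 := by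
  induction xs with
  | nil => intro c P _; rfl
  | cons p rest ih =>
    intro c P h
    have hp := h p (by simp)
    have hrest : ∀ q ∈ rest, (0:Int) ≤ q.2 := fun q hq => h q (by simp [hq])
    by_cases hPZ : P < Z
    · have hmax : max (Z - P) 0 = Z - P := by omega
      rw [List.foldl_cons, List.foldl_cons, hmax,
        show pvStep (c, Z - P) p =
          (c.insert p (min (Z - P) (2 * (2 * p.2 + 1))), (Z - P) - min (Z - P) (2 * (2 * p.2 + 1)))
          from by simp [pvStep]; omega,
        show pvGStep Z (c, P) p =
          (c.insert p (min (Z - P) (2 * (2 * p.2 + 1))), P + 2 * (2 * p.2 + 1))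
          from by simp [pvGStep, hPZ]]
      have : (Z - P) - min (Z - P) (2 * (2 * p.2 + 1)) = max (Z - (P + 2 * (2 * p.2 + 1))) 0 := by
        rcases le_total (Z - P) (2 * (2 * p.2 + 1)) with hle | hge
        · rw [min_eq_left hle]; omega
        · rw [min_eq_right hge]; omega
      rw [this]
      exact ih _ _ hrest
    · have hmax : max (Z - P) 0 = 0 := by omega
      rw [List.foldl_cons, List.foldl_cons, hmax,
        show pvStep (c, 0) p = (c, 0) from by simp [pvStep], fold_zero,
        show pvGStep Z (c, P) p = (c, P + 2 * (2 * p.2 + 1)) from by simp [pvGStep]; omega]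
      exact (gfold_noins Z rest c _ (by omega) hrest).symm

theorem filter_le_pyRange (t : Int) : ∀ (a b : Int),
    (PySem.List.pyRange a b 1).filter (fun x => decide (t ≤ x)) = PySem.List.pyRange (max a t) b 1 := by
  intro a b
  by_cases hab : a < b
  · induction h : (b - a).toNat generalizing a with
    | zero => omega
    | succ n ih =>
      rw [PySem.List.pyRange_one_cons hab, List.filter_cons]
      by_cases hta : t ≤ a
      · have hmax : max a t = a := by omega
        have hmax1 : max (a + 1) t = a + 1 := by omega
        by_cases hab1 : a + 1 < b
        · rw [if_pos (by simpa using hta), ih (a+1) hab1 (by omega), hmax1, hmax,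
            ← PySem.List.pyRange_one_cons hab]
        · have hb : b = a + 1 := by omega
          subst hb
          simp [hta, PySem.List.pyRange_one_eq_nil (le_refl (a+1)),
            PySem.List.pyRange_one_singleton]
      · have hmax : max a t = t := by omega
        have hmax1 : max (a + 1) t = t := by omega
        by_cases hab1 : a + 1 < b
        · rw [if_neg (by simpa using hta), ih (a+1) hab1 (by omega), hmax1, hmax]
        · have hb : b = a + 1 := by omega
          subst hb
          simp [hta, PySem.List.pyRange_one_eq_nil (show a+1 ≤ a+1 from le_refl _), hmax,
            PySem.List.pyRange_one_eq_nil (show a+1 ≤ t from by omega)]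
  · rw [PySem.List.pyRange_one_eq_nil (by omega), PySem.List.pyRange_one_eq_nil (by omega)]
    rfl

theorem pyRange_shift (a b : Int) :
    (PySem.List.pyRange a b 1).map (fun x => x + 1) = PySem.List.pyRange (a + 1) (b + 1) 1 := by
  rw [PySem.List.pyRange_one, PySem.List.pyRange_one, List.map_map]
  have : (b + 1 - (a + 1)).toNat = (b - a).toNat := by omega
  rw [this]
  apply List.map_congr_left
  intro k _
  simp; omega

theorem innerA_eq (nl : Int) : ∀ (ns : List Int) (c : PySem.Dict (Int × Int) Int) (r : Int),
    0 ≤ r → (∀ nr ∈ ns, nl - nr - 1 ≤ nr → 0 ≤ nl - nr - 1) →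
    pvInnerA nl c r ns =
      List.foldl pvStep (c, r)
        ((ns.filter (fun nr => decide (nl - nr - 1 ≤ nr))).map (fun nr => (nr + 1, nl - nr - 1))) := by
  intro ns
  induction ns with
  | nil => intro c r _ _; rfl
  | cons nr rest ih =>
    intro c r hr h
    have hrest : ∀ x ∈ rest, nl - x - 1 ≤ x → 0 ≤ nl - x - 1 := fun x hx => h x (by simp [hx])
    rw [List.filter_cons]
    by_cases hq : nl - nr - 1 ≤ nr
    · have hl : (0:Int) ≤ nl - nr - 1 := h nr (by simp) hq
      rw [if_pos (by simpa using hq)]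
      by_cases h0 : r = 0
      · subst h0
        have : pvInnerA nl c 0 (nr :: rest) = (c, 0) := by
          simp only [pvInnerA, if_pos hq]
          have : (if (0:Int) > 2 * (2 * (nl - nr - 1) + 1) then 2 * (2 * (nl - nr - 1) + 1) else 0) = 0 := by
            rw [if_neg (by omega)]
          simp [this]
        rw [this, List.map_cons, List.foldl_cons,
          show pvStep (c, 0) (nr + 1, nl - nr - 1) = (c, 0) from by simp [pvStep], fold_zero]
      · have hrpos : 0 < r := lt_of_le_of_ne hr (Ne.symm h0)
        have hocc : (if r > 2 * (2 * (nl - nr - 1) + 1) then 2 * (2 * (nl - nr - 1) + 1) else r)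
            = min r (2 * (2 * (nl - nr - 1) + 1)) := by
          rcases le_or_gt r (2 * (2 * (nl - nr - 1) + 1)) with hle | hgt
          · rw [if_neg (by omega), min_eq_left hle]
          · rw [if_pos hgt, min_eq_right (le_of_lt hgt)]
        have hne : min r (2 * (2 * (nl - nr - 1) + 1)) ≠ 0 := by
          have : (0:Int) < min r (2 * (2 * (nl - nr - 1) + 1)) := by
            rw [lt_min_iff]; omega
          omega
        simp only [pvInnerA, if_pos hq, hocc]
        rw [if_neg hne]
        rw [ih _ _ (by have := min_le_left r (2 * (2 * (nl - nr - 1) + 1)); omega) hrest,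
          List.map_cons, List.foldl_cons]
        congr 1
        simp [pvStep, h0]
    · rw [if_neg (by simpa using hq)]
      simp only [pvInnerA, if_neg hq]
      exact ih _ _ hr hrest

theorem block_snd_nonneg (s : Int) : ∀ p ∈ pvBlock s, 0 ≤ p.2 := by
  intro p hp
  simp only [pvBlock, List.mem_map] at hp
  obtain ⟨n, hn, rfl⟩ := hp
  rw [PySem.List.mem_pyRange_one] at hn
  simp; omega

theorem blockA_eq (nl : Int) (h : 1 ≤ nl) :
    ((PySem.List.pyRange 0 nl 1).filter (fun nr => decide (nl - nr - 1 ≤ nr))).map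
        (fun nr => (nr + 1, nl - nr - 1)) = pvBlock nl := by
  have ht := (PySem.Int.floordiv_eq_iff_of_pos (a := nl) (b := 2)
    (q := PySem.Int.floordiv nl 2) (by omega)).mp rfl
  set t := PySem.Int.floordiv nl 2 with htdef
  have hpred : (fun nr : Int => decide (nl - nr - 1 ≤ nr)) = (fun nr : Int => decide (t ≤ nr)) := by
    funext x
    by_cases hx : t ≤ x
    · rw [decide_eq_true (show nl - x - 1 ≤ x by omega), decide_eq_true hx]
    · rw [decide_eq_false (show ¬ nl - x - 1 ≤ x by omega), decide_eq_false hx]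
  rw [hpred, filter_le_pyRange, show max 0 t = t from by omega]
  unfold pvBlock
  rw [← htdef, ← pyRange_shift, List.map_map]
  apply List.map_congr_left
  intro k _
  simp; omega

theorem whileA_eq (Z : Int) : ∀ (fuel : Nat) (c : PySem.Dict (Int × Int) Int) (nl r : Int),
    1 ≤ nl → 0 ≤ r → r ≤ (fuel : Int) →
    pvWhileA c nl r fuel =
      List.foldl pvStep (c, r) ((List.range fuel).flatMap (fun i : Nat => pvBlock (nl + (i : Int)))) := by
  intro fuel
  induction fuel with
  | zero =>
    intro c nl r _ hr hf
    have : r = 0 := by omega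
    subst this
    rfl
  | succ fuel ih =>
    intro c nl r hnl hr hf
    have hsplit : (List.range (fuel + 1)).flatMap (fun i : Nat => pvBlock (nl + (i : Int))) =
        pvBlock nl ++ (List.range fuel).flatMap (fun i : Nat => pvBlock ((nl + 1) + (i : Int))) := by
      rw [List.range_succ_eq_map, List.flatMap_cons, List.flatMap_map]
      congr 1
      · norm_num
      · exact List.flatMap_congr (fun x _ => by push_cast; ring_nf)
    by_cases hrpos : r > 0
    · have hinner : pvInnerA nl c r (PySem.List.pyRange 0 nl 1) =
          List.foldl pvStep (c, r) (pvBlock nl) := by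
        rw [innerA_eq nl _ c r hr (fun nr hnr _ => by
          rw [PySem.List.mem_pyRange_one] at hnr; omega), blockA_eq nl hnl]
      have hrem : 0 ≤ (List.foldl pvStep (c, r) (pvBlock nl)).2 ∧
          (List.foldl pvStep (c, r) (pvBlock nl)).2 ≤ r - 1 := by
        have hb : pvBlock nl ≠ [] := by
          unfold pvBlock
          have : PySem.Int.floordiv nl 2 + 1 < nl + 1 := by
            have := (PySem.Int.floordiv_eq_iff_of_pos (a := nl) (b := 2)
              (q := PySem.Int.floordiv nl 2) (by omega)).mp rfl
            omega
          rw [PySem.List.pyRange_one_cons this]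
          simp
        obtain ⟨p, rest, hpr⟩ := List.exists_cons_of_ne_nil hb
        have hp2 : (0:Int) ≤ p.2 := block_snd_nonneg nl p (by rw [hpr]; simp)
        rw [hpr, List.foldl_cons,
          show pvStep (c, r) p =
            (c.insert p (min r (2 * (2 * p.2 + 1))), r - min r (2 * (2 * p.2 + 1))) from by
            simp [pvStep]; omega]
        have hstep : 0 ≤ r - min r (2 * (2 * p.2 + 1)) ∧ r - min r (2 * (2 * p.2 + 1)) ≤ r - 1 := by
          rcases le_total r (2 * (2 * p.2 + 1)) with hle | hge
          · rw [min_eq_left hle]; omega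
          · rw [min_eq_right hge]; omega
        -- the rest of the fold never raises the counter
        have hmono : ∀ (ys : List (Int × Int)) (d : PySem.Dict (Int × Int) Int) (u : Int),
            (∀ q ∈ ys, (0:Int) ≤ q.2) →
            0 ≤ u → 0 ≤ (List.foldl pvStep (d, u) ys).2 ∧ (List.foldl pvStep (d, u) ys).2 ≤ u := by
          intro ys
          induction ys with
          | nil => intro d u _ hu; exact ⟨hu, le_refl u⟩
          | cons q qs ihq =>
            intro d u hys hu
            have hq2 : (0:Int) ≤ q.2 := hys q (by simp)
            have hqs : ∀ x ∈ qs, (0:Int) ≤ x.2 := fun x hx => hys x (by simp [hx])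
            by_cases hu0 : u = 0
            · subst hu0
              rw [List.foldl_cons, show pvStep (d, 0) q = (d, 0) from by simp [pvStep], fold_zero]
              exact ⟨le_refl 0, le_refl 0⟩
            · rw [List.foldl_cons,
                show pvStep (d, u) q =
                  (d.insert q (min u (2 * (2 * q.2 + 1))), u - min u (2 * (2 * q.2 + 1))) from by
                  simp [pvStep]; omega]
              have hmin : min u (2 * (2 * q.2 + 1)) ≤ u := min_le_left _ _
              have h0 : 0 ≤ u - min u (2 * (2 * q.2 + 1)) ∨ True := Or.inr trivial
              rcases le_total u (2 * (2 * q.2 + 1)) with hle | hge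
              · rw [min_eq_left hle]
                have := ihq (d.insert q u) 0 hqs (le_refl 0)
                simpa using ⟨this.1, le_trans this.2 (by omega)⟩
              · rw [min_eq_right hge]
                rcases le_or_gt 0 (u - 2 * (2 * q.2 + 1)) with hok | hbad
                · have := ihq (d.insert q (2 * (2 * q.2 + 1))) (u - 2 * (2 * q.2 + 1)) hqs hok
                  exact ⟨this.1, le_trans this.2 (by omega)⟩
                · omega
        have hrestnn : ∀ q ∈ rest, (0:Int) ≤ q.2 := fun q hq =>
          block_snd_nonneg nl q (by rw [hpr]; simp [hq])
        have := hmono rest (c.insert p (min r (2 * (2 * p.2 + 1)))) (r - min r (2 * (2 * p.2 + 1))) hrestnn hstep.1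
        exact ⟨this.1, le_trans this.2 hstep.2⟩
      set st := List.foldl pvStep (c, r) (pvBlock nl) with hst
      show (if r > 0 then
          pvWhileA (pvInnerA nl c r (PySem.List.pyRange 0 nl 1)).1 (nl + 1)
            (pvInnerA nl c r (PySem.List.pyRange 0 nl 1)).2 fuel
        else (c, r)) = _
      rw [if_pos hrpos, hinner, ih st.1 (nl + 1) st.2 (by omega) (by omega) (by omega),
        hsplit, List.foldl_append, ← hst]
    · have : r = 0 := by omega
      subst this
      show (if (0:Int) > 0 then _ else (c, (0:Int))) = _
      rw [if_neg (by omega), hsplit, List.foldl_append, fold_zero, fold_zero]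

-- closed-form facts about pvFull / pvBefore
theorem fd2_eq (a q : Int) (h1 : 2 * q ≤ a) (h2 : a < 2 * q + 2) :
    PySem.Int.floordiv a 2 = q :=
  (PySem.Int.floordiv_eq_iff_of_pos (by omega)).mpr ⟨by omega, by omega⟩

theorem fd3_exact (a q : Int) (h : a = 3 * q) : PySem.Int.floordiv a 3 = q :=
  (PySem.Int.floordiv_eq_iff_of_pos (by omega)).mpr ⟨by omega, by omega⟩

theorem pvFull_odd (m : Int) (h : 0 ≤ m) :
    pvFull (2 * m + 1) = PySem.Int.floordiv (2 * m * (m + 1) * (2 * m + 1)) 3 := by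
  simp only [pvFull]
  rw [show (2 * m + 1 - 1 : Int) = 2 * m from by ring, fd2_eq (2 * m) m (by omega) (by omega),
    PySem.Int.mod_eq_emod_of_pos (by omega)]
  rw [if_neg (by omega)]

theorem pvFull_even (m : Int) (h : 1 ≤ m) :
    pvFull (2 * m) = PySem.Int.floordiv (2 * (m - 1) * m * (2 * m - 1)) 3 + 2 * m ^ 2 := by
  simp only [pvFull]
  rw [fd2_eq (2 * m - 1) (m - 1) (by omega) (by omega),
    PySem.Int.mod_eq_emod_of_pos (by omega)]
  rw [if_pos (by omega)]
  have harg : (2 * (m - 1) * m * (2 * (m - 1) + 1) : Int) = 2 * (m - 1) * m * (2 * m - 1) := by ring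
  rw [show ((m:Int) - 1 + 1) = m from by ring]
  rw [harg]

theorem full_rec (s : Int) (h : 1 ≤ s) :
    pvFull (s + 1) = pvFull s + 2 * (PySem.Int.floordiv (s + 1) 2) ^ 2 := by
  obtain ⟨m, hm⟩ : ∃ m, s = 2 * m ∨ s = 2 * m + 1 := ⟨s / 2, by omega⟩
  rcases hm with hm | hm
  · -- s = 2m, m ≥ 1
    subst hm
    have hm1 : 1 ≤ m := by omega
    rw [pvFull_odd m (by omega), pvFull_even m hm1, fd2_eq (2 * m + 1) m (by omega) (by omega)]
    obtain ⟨j, hj⟩ : ∃ j, m = 3 * j ∨ m = 3 * j + 1 ∨ m = 3 * j + 2 := ⟨m / 3, by omega⟩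
    rcases hj with hj | hj | hj
    · rw [fd3_exact _ (2 * j * (3 * j + 1) * (6 * j + 1)) (by rw [hj]; ring),
        fd3_exact _ (2 * j * (3 * j - 1) * (6 * j - 1)) (by rw [hj]; ring)]
      rw [hj]; ring
    · rw [fd3_exact _ (2 * (3 * j + 1) * (3 * j + 2) * (2 * j + 1)) (by rw [hj]; ring),
        fd3_exact _ (2 * j * (3 * j + 1) * (6 * j + 1)) (by rw [hj]; ring)]
      rw [hj]; ring
    · rw [fd3_exact _ (2 * (3 * j + 2) * (j + 1) * (6 * j + 5)) (by rw [hj]; ring),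
        fd3_exact _ (2 * (3 * j + 1) * (3 * j + 2) * (2 * j + 1)) (by rw [hj]; ring)]
      rw [hj]; ring
  · -- s = 2m+1, m ≥ 0
    subst hm
    have hm0 : 0 ≤ m := by omega
    rw [show (2 * m + 1 + 1 : Int) = 2 * (m + 1) from by ring, pvFull_even (m + 1) (by omega),
      pvFull_odd m hm0, fd2_eq (2 * (m + 1)) (m + 1) (by omega) (by omega),
      show (2 * ((m:Int) + 1 - 1) * (m + 1) * (2 * (m + 1) - 1)) = 2 * m * (m + 1) * (2 * m + 1) from by ring]

theorem before_start (s : Int) :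
    pvBefore (PySem.Int.floordiv s 2 + 1) (s - (PySem.Int.floordiv s 2 + 1)) = pvFull s := by
  simp only [pvBefore]
  rw [show (PySem.Int.floordiv s 2 + 1) + (s - (PySem.Int.floordiv s 2 + 1)) = s from by ring]
  ring

theorem before_step (s n : Int) :
    pvBefore (n + 1) (s - (n + 1)) = pvBefore n (s - n) + 2 * (2 * (s - n) + 1) := by
  simp only [pvBefore]
  rw [show ((n:Int) + 1) + (s - (n + 1)) = n + (s - n) from by ring]
  ring

theorem cap_range : ∀ (k : Nat) (a b : Int), a ≤ b + 1 → (b + 1 - a).toNat = k →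
    pvCapList ((PySem.List.pyRange a (b + 1) 1).map (fun n => (n, b - n))) = 2 * (b + 1 - a) ^ 2 := by
  intro k
  induction k with
  | zero =>
    intro a b hab hk
    rw [PySem.List.pyRange_one_eq_nil (by omega), show b + 1 - a = 0 from by omega]
    simp [pvCapList]
  | succ k ih =>
    intro a b hab hk
    rw [PySem.List.pyRange_one_cons (by omega), List.map_cons]
    have : pvCapList ((a, b - a) :: ((PySem.List.pyRange (a + 1) (b + 1) 1).map (fun n => (n, b - n))))
        = 2 * (2 * (b - a) + 1) +
          pvCapList ((PySem.List.pyRange (a + 1) (b + 1) 1).map (fun n => (n, b - n))) := by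
      simp only [pvCapList, List.map_cons, List.sum_cons]
    rw [this, ih (a + 1) b (by omega) (by omega)]
    ring

theorem capBlock (s : Int) (h : 1 ≤ s) :
    pvCapList (pvBlock s) = 2 * (PySem.Int.floordiv (s + 1) 2) ^ 2 := by
  have ht := (PySem.Int.floordiv_eq_iff_of_pos (a := s) (b := 2)
    (q := PySem.Int.floordiv s 2) (by omega)).mp rfl
  have ht1 := (PySem.Int.floordiv_eq_iff_of_pos (a := s + 1) (b := 2)
    (q := PySem.Int.floordiv (s + 1) 2) (by omega)).mp rfl
  unfold pvBlock
  rw [cap_range (s + 1 - (PySem.Int.floordiv s 2 + 1)).toNat (PySem.Int.floordiv s 2 + 1) s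
    (by omega) rfl]
  have : s + 1 - (PySem.Int.floordiv s 2 + 1) = PySem.Int.floordiv (s + 1) 2 := by omega
  rw [this]

-- B's inner for-loop is the prefix fold over one diagonal block
theorem innerB_eq (Z s : Int) : ∀ (k : Nat) (n : Int) (c : PySem.Dict (Int × Int) Int),
    (s + 1 - n).toNat = k →
    pvInnerB Z s c (PySem.List.pyRange n (s + 1) 1) =
      (List.foldl (pvGStep Z) (c, pvBefore n (s - n))
        ((PySem.List.pyRange n (s + 1) 1).map (fun m => (m, s - m)))).1 := by
  intro k
  induction k with
  | zero =>
    intro n c hk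
    rw [PySem.List.pyRange_one_eq_nil (by omega)]
    rfl
  | succ k ih =>
    intro n c hk
    have hn : n < s + 1 := by omega
    rw [PySem.List.pyRange_one_cons hn, List.map_cons, List.foldl_cons]
    have hl : (0:Int) ≤ s - n := by omega
    have hcap : (0:Int) < 2 * (2 * (s - n) + 1) := by omega
    set P := pvBefore n (s - n) with hP
    have hg : pvGStep Z (c, P) (n, s - n) =
        ((if P < Z then c.insert (n, s - n) (min (Z - P) (2 * (2 * (s - n) + 1))) else c),
          pvBefore (n + 1) (s - (n + 1))) := by
      simp only [pvGStep, before_step s n, hP]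
    rw [hg]
    by_cases hPZ : P < Z
    · have hocc : (0:Int) < min (2 * (2 * (s - n) + 1)) (Z - P) := by
        rw [lt_min_iff]; omega
      show (if 0 < min (2 * (2 * (s - n) + 1)) (Z - pvBefore n (s - n)) then
          pvInnerB Z s (c.insert (n, s - n) (min (2 * (2 * (s - n) + 1)) (Z - pvBefore n (s - n))))
            (PySem.List.pyRange (n + 1) (s + 1) 1)
        else pvInnerB Z s c (PySem.List.pyRange (n + 1) (s + 1) 1)) = _
      rw [if_pos (by rw [← hP]; exact hocc), if_pos hPZ, min_comm (Z - P) (2 * (2 * (s - n) + 1)),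
        ← hP]
      exact ih (n + 1) _ (by omega)
    · have hocc : ¬ (0:Int) < min (2 * (2 * (s - n) + 1)) (Z - P) := by
        rw [lt_min_iff]; omega
      show (if 0 < min (2 * (2 * (s - n) + 1)) (Z - pvBefore n (s - n)) then
          pvInnerB Z s (c.insert (n, s - n) (min (2 * (2 * (s - n) + 1)) (Z - pvBefore n (s - n))))
            (PySem.List.pyRange (n + 1) (s + 1) 1)
        else pvInnerB Z s c (PySem.List.pyRange (n + 1) (s + 1) 1)) = _
      rw [if_neg (by rw [← hP]; exact hocc), if_neg hPZ]
      exact ih (n + 1) _ (by omega)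

-- B's while loop is the prefix fold over fuel-many diagonal blocks
theorem whileB_eq (Z : Int) : ∀ (fuel : Nat) (s : Int) (c : PySem.Dict (Int × Int) Int), 1 ≤ s →
    pvWhileB Z c s fuel =
      (List.foldl (pvGStep Z) (c, pvFull s)
        ((List.range fuel).flatMap (fun i : Nat => pvBlock (s + (i : Int))))).1 := by
  intro fuel
  induction fuel with
  | zero => intro s c _; rfl
  | succ fuel ih =>
    intro s c hs
    have hsplit : (List.range (fuel + 1)).flatMap (fun i : Nat => pvBlock (s + (i : Int))) =
        pvBlock s ++ (List.range fuel).flatMap (fun i : Nat => pvBlock ((s + 1) + (i : Int))) := by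
      rw [List.range_succ_eq_map, List.flatMap_cons, List.flatMap_map]
      congr 1
      · norm_num
      · exact List.flatMap_congr (fun x _ => by push_cast; ring_nf)
    show (if pvBefore (PySem.Int.floordiv s 2 + 1) (s - (PySem.Int.floordiv s 2 + 1)) < Z then
        pvWhileB Z
          (pvInnerB Z s c (PySem.List.pyRange (PySem.Int.floordiv s 2 + 1) (s + 1) 1))
          (s + 1) fuel
      else c) = _
    rw [before_start, hsplit, List.foldl_append]
    by_cases hZ : pvFull s < Z
    · rw [if_pos hZ]
      have hinner : pvInnerB Z s c (PySem.List.pyRange (PySem.Int.floordiv s 2 + 1) (s + 1) 1) =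
          (List.foldl (pvGStep Z) (c, pvFull s) (pvBlock s)).1 := by
        rw [innerB_eq Z s (s + 1 - (PySem.Int.floordiv s 2 + 1)).toNat _ c rfl, before_start]
        rfl
      have hmid : List.foldl (pvGStep Z) (c, pvFull s) (pvBlock s) =
          ((List.foldl (pvGStep Z) (c, pvFull s) (pvBlock s)).1, pvFull (s + 1)) := by
        have h2 : (List.foldl (pvGStep Z) (c, pvFull s) (pvBlock s)).2 = pvFull (s + 1) := by
          rw [gfold_snd, capBlock s hs, ← full_rec s hs]
        rw [← h2]
      rw [hinner, ih (s + 1) _ (by omega)]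
      rw [hmid]
    · rw [if_neg hZ]
      have hnn : ∀ p ∈ (List.range fuel).flatMap (fun i : Nat => pvBlock ((s + 1) + (i : Int))),
          (0:Int) ≤ p.2 := by
        intro p hp
        simp only [List.mem_flatMap] at hp
        obtain ⟨i, _, hpi⟩ := hp
        exact block_snd_nonneg _ p hpi
      have hmid : List.foldl (pvGStep Z) (c, pvFull s) (pvBlock s) =
          ((List.foldl (pvGStep Z) (c, pvFull s) (pvBlock s)).1, pvFull (s + 1)) := by
        have h2 : (List.foldl (pvGStep Z) (c, pvFull s) (pvBlock s)).2 = pvFull (s + 1) := by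
          rw [gfold_snd, capBlock s hs, ← full_rec s hs]
        rw [← h2]
      have hsq : (0:Int) ≤ (PySem.Int.floordiv (s + 1) 2) ^ 2 := sq_nonneg _
      have hfr := full_rec s hs
      rw [hmid, gfold_noins Z _ _ _ (by omega) hnn]
      rw [gfold_noins Z _ _ _ (by omega) (block_snd_nonneg s)]

theorem main_eq (Z : Int) : get_configuration Z = get_configuration_alt Z := by
  rcases le_or_gt Z 0 with hZ | hZ
  · have h0 : Z.toNat = 0 := Int.toNat_of_nonpos hZ
    unfold get_configuration get_configuration_alt
    rw [h0]
    rfl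
  · have hA : pvWhileA PySem.Dict.empty 1 Z Z.toNat =
        List.foldl pvStep (PySem.Dict.empty, Z)
          ((List.range Z.toNat).flatMap (fun i : Nat => pvBlock (1 + (i : Int)))) :=
      whileA_eq Z Z.toNat PySem.Dict.empty 1 Z (le_refl 1) (by omega) (by omega)
    have hB : pvWhileB Z PySem.Dict.empty 1 Z.toNat =
        (List.foldl (pvGStep Z) (PySem.Dict.empty, pvFull 1)
          ((List.range Z.toNat).flatMap (fun i : Nat => pvBlock (1 + (i : Int))))).1 :=
      whileB_eq Z Z.toNat 1 PySem.Dict.empty (le_refl 1)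
    have hfull1 : pvFull 1 = 0 := by decide
    have hnn : ∀ p ∈ (List.range Z.toNat).flatMap (fun i : Nat => pvBlock (1 + (i : Int))),
        (0:Int) ≤ p.2 := by
      intro p hp
      simp only [List.mem_flatMap] at hp
      obtain ⟨i, _, hpi⟩ := hp
      exact block_snd_nonneg _ p hpi
    have hbridge := fold_AtoG Z
      ((List.range Z.toNat).flatMap (fun i : Nat => pvBlock (1 + (i : Int))))
      PySem.Dict.empty 0 hnn
    rw [show max (Z - 0) 0 = Z from by omega] at hbridge
    simp only [get_configuration, get_configuration_alt]
    rw [hA, hB, hfull1, hbridge]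

-- ===== VERDICT (by name: the statement is the Claim_ definition above) =====
theorem get_configuration_spec : Claim_equal_get_configuration := fun Z _ => main_eq Z
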